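-- pv_equiv track=rewrite | github.com/SprieteJ/Exhibit_Library_React | Dashboard/api/macro_sensitivity.py | _first_diffs
-- ===== SOURCE A (Python) =====
-- def _first_diffs(val_map, keys):
--     rets = {}
--     prev = None
--     for k in keys:
--         v = val_map.get(k)
--         if v is not None and prev is not None:
--             rets[k] = v - prev
--         prev = v if v is not None else prev
--     return rets
-- ===== SOURCE B (Python) =====
-- def _first_diffs(val_map, keys):
--     filtered = [(k, val_map[k]) for k in keys if k in val_map]
--     rets = {}
--     for (k0, v0), (k1, v1) in zip(filtered, filtered[1:]):
--         rets[k1] = v1 - v0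
--     return rets
-- ===== Notes on version B (the rewrite author's own statement) =====
-- stated objective: alternative
-- what changed: Replaces the prev-threading single pass with a two-phase shape: first reify the list of keys present in val_map with their values, then compute differences over consecutive pairs via zip(filtered, filtered[1:]).
import Mathlib
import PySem

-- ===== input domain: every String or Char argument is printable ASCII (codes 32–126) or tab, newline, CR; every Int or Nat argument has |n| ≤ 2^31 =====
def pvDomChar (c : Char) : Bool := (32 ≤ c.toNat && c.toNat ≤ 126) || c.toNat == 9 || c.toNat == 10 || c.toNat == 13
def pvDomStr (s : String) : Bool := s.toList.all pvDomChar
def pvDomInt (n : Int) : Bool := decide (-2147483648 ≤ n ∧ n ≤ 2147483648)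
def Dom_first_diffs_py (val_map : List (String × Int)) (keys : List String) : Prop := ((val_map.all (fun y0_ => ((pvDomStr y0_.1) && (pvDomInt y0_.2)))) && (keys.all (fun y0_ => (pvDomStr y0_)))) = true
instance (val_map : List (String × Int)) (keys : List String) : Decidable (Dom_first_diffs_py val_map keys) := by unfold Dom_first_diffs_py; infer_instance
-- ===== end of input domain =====

-- B replaces A's prev-threading single pass by a two-phase filter-then-pairwise-zip traversal (alternative decomposition, same cost).

-- ===== PORT A =====
-- literal port of A: one pass over keys threading (rets, prev)
def first_diffs_py (val_map : List (String × Int)) (keys : List String) : List (String × Int) :=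
  let st := keys.foldl
    (fun (st : PySem.Dict String Int × Option Int) k =>
      let v := (PySem.Dict.mk val_map).get? k
      let rets :=
        match v, st.2 with
        | some x, some p => st.1.insert k (x - p)
        | _, _ => st.1
      let prev := match v with | some x => some x | none => st.2
      (rets, prev))
    (PySem.Dict.empty, none)
  st.1.items

-- ===== PORT B =====
-- port of B: reify the present entries, then fold pairwise differences over zip(filtered, filtered[1:])
def first_diffs_py_alt (val_map : List (String × Int)) (keys : List String) : List (String × Int) :=
  let filtered := keys.filterMap (fun k => ((PySem.Dict.mk val_map).get? k).map (fun v => (k, v)))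
  let rets := (filtered.zip (filtered.drop 1)).foldl
    (fun (d : PySem.Dict String Int) pr => d.insert pr.2.1 (pr.2.2 - pr.1.2))
    PySem.Dict.empty
  rets.items

-- ===== PRECONDITION & SPEC =====
def Spec_first_diffs_py (val_map : List (String × Int)) (keys : List String) (out : List (String × Int)) : Prop := out = first_diffs_py_alt val_map keys
instance (val_map : List (String × Int)) (keys : List String) (out : List (String × Int)) : Decidable (Spec_first_diffs_py val_map keys out) := by unfold Spec_first_diffs_py; infer_instance

-- ===== CLAIM (what is proved, stated in full; the proofs are below) =====
def Claim_equal_first_diffs_py : Prop := ∀ (val_map : List (String × Int)) (keys : List String), Dom_first_diffs_py val_map keys → Spec_first_diffs_py val_map keys (first_diffs_py val_map keys)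

-- ===== LEMMAS AND PROOFS =====

-- the sequence of (key, difference) pairs produced over the present entries, threading the previous value
def pvDiffList (prev : Option Int) : List (String × Int) → List (String × Int)
  | [] => []
  | (k, v) :: r =>
    match prev with
    | none => pvDiffList (some v) r
    | some p => (k, v - p) :: pvDiffList (some v) r

def pvInsertAll (d : PySem.Dict String Int) (l : List (String × Int)) : PySem.Dict String Int :=
  l.foldl (fun d kv => d.insert kv.1 kv.2) d

theorem pvA_loop (val_map : List (String × Int)) (keys : List String)
    (d : PySem.Dict String Int) (prev : Option Int) :
    (keys.foldl
      (fun (st : PySem.Dict String Int × Option Int) k =>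
        let v := (PySem.Dict.mk val_map).get? k
        let rets :=
          match v, st.2 with
          | some x, some p => st.1.insert k (x - p)
          | _, _ => st.1
        let prev := match v with | some x => some x | none => st.2
        (rets, prev))
      (d, prev)).1
    = pvInsertAll d (pvDiffList prev
        (keys.filterMap (fun k => ((PySem.Dict.mk val_map).get? k).map (fun v => (k, v))))) := by
  induction keys generalizing d prev with
  | nil => rfl
  | cons k rest ih =>
    simp only [List.foldl_cons, List.filterMap_cons]
    cases hv : (PySem.Dict.mk val_map).get? k with
    | none => simpa [hv] using ih d prev
    | some x =>
      cases prev with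
      | none => simpa [hv, pvDiffList] using ih d (some x)
      | some p =>
        simpa [hv, pvDiffList, pvInsertAll] using ih (d.insert k (x - p)) (some x)

theorem pvB_loop (fs : List (String × Int)) (k0 : String) (p : Int) (d : PySem.Dict String Int) :
    ((((k0, p) :: fs).zip fs).foldl
      (fun (d : PySem.Dict String Int) pr => d.insert pr.2.1 (pr.2.2 - pr.1.2)) d)
    = pvInsertAll d (pvDiffList (some p) fs) := by
  induction fs generalizing k0 p d with
  | nil => rfl
  | cons f r ih =>
    obtain ⟨k, v⟩ := f
    simpa [pvDiffList, pvInsertAll] using ih k v (d.insert k (v - p))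

-- ===== VERDICT (by name: the statement is the Claim_ definition above) =====
theorem first_diffs_py_spec : Claim_equal_first_diffs_py := by
  intro val_map keys _
  show first_diffs_py val_map keys = first_diffs_py_alt val_map keys
  simp only [first_diffs_py, first_diffs_py_alt]
  rw [pvA_loop]
  cases hf : keys.filterMap (fun k => ((PySem.Dict.mk val_map).get? k).map (fun v => (k, v))) with
  | nil => simp [pvDiffList, pvInsertAll]
  | cons f r =>
    obtain ⟨k, v⟩ := f
    simp only [List.drop_one, List.tail_cons]
    rw [pvB_loop r k v]
    rfl
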